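-- pv_equiv track=rewrite | github.com/bavalpey/codefights | core/wellOfIntegration/switchLights.py | switchLights
-- ===== SOURCE A (Python) =====
-- def switchLights(a):
--     for pos,candle in enumerate(a):
--         if candle == 1:
--             a[pos] = 0
--             for pos2,candle2 in enumerate(a[:pos]):
--                 if candle2 == 1:
--                     a[pos2] = 0
--                 else:
--                     a[pos2] = 1
--     return a
-- ===== SOURCE B (Python) =====
-- def switchLights(a):
--     out = []
--     ones = 0  # number of 1s seen so far (i.e. strictly to the right of the current position)
--     for v in reversed(a):
--         if ones == 0:
--             out.append(0 if v == 1 else v)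
--         else:
--             out.append(ones % 2)
--         if v == 1:
--             ones += 1
--     out.reverse()
--     return out
-- ===== Notes on version B (the rewrite author's own statement) =====
-- stated objective: alternative
-- what changed: Replaces the in-place simulation (which zeroes each lit candle and re-flips the whole prefix before it) by a single right-to-left pass tracking the running count of 1s seen so far: each output is a[i] itself if no 1 lies strictly to its right, else the parity of the 1s strictly to its right (a 1 with nothing firing after it becomes 0).
import Mathlib
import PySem

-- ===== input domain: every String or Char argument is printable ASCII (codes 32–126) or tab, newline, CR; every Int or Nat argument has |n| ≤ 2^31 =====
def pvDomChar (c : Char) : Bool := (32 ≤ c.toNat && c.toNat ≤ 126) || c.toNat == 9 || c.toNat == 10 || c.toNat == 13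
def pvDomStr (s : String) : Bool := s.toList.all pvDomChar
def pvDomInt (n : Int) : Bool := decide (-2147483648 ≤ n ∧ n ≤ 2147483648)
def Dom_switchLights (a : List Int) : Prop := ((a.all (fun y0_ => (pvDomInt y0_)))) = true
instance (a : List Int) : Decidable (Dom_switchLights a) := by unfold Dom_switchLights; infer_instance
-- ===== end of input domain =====

-- B replaces A's in-place prefix-reflipping simulation by one right-to-left pass tracking
-- the running count of 1s (objective: alternative). A mutates its argument in place;
-- the equivalence proved here is about the RETURN value only (B does not mutate).

-- ===== PORT A =====
def switchLights (a : List Int) : List Int :=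
  (List.range a.length).foldl (fun cur (pos : Nat) =>
    let candle := PySem.List.pyGetD cur (pos : Int) 0
    if candle = 1 then
      let cur2 := PySem.List.pySetD cur (pos : Int) 0
      (PySem.List.enumerate (PySem.List.slice cur2 none (some (pos : Int)))).foldl
        (fun c pc =>
          if pc.2 = 1 then PySem.List.pySetD c pc.1 0
          else PySem.List.pySetD c pc.1 1) cur2
    else cur) a

-- ===== PORT B =====
def switchLights_alt (a : List Int) : List Int :=
  let st := a.reverse.foldl (fun (st : List Int × Nat) v =>
    (st.1 ++ [if st.2 = 0 then (if v = 1 then 0 else v) else ((st.2 % 2 : Nat) : Int)],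
     if v = 1 then st.2 + 1 else st.2)) ([], 0)
  st.1.reverse

-- ===== PRECONDITION & SPEC =====
def Spec_switchLights (a : List Int) (out : List Int) : Prop := out = switchLights_alt a
instance (a : List Int) (out : List Int) : Decidable (Spec_switchLights a out) := by unfold Spec_switchLights; infer_instance

-- ===== CLAIM (what is proved, stated in full; the proofs are below) =====
def Claim_equal_switchLights : Prop := ∀ (a : List Int), Dom_switchLights a → Spec_switchLights a (switchLights a)

-- ===== LEMMAS AND PROOFS =====

-- the value a light is flipped to
def pvFlip (x : Int) : Int := if x = 1 then 0 else 1

-- final value of a light whose original value is v with k ones strictly to its right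
def pvF (v : Int) (k : Nat) : Int := if k = 0 then (if v = 1 then 0 else v) else ((k % 2 : Nat) : Int)

-- the common mathematical model: position-wise pvF, with k extra ones beyond the list's end
def pvM : List Int → Nat → List Int
  | [], _ => []
  | v :: rest, k => pvF v (rest.count 1 + k) :: pvM rest k

theorem pvM_length (l : List Int) (k : Nat) : (pvM l k).length = l.length := by
  induction l generalizing k with
  | nil => rfl
  | cons v rest ih => simp [pvM, ih]

theorem pvM_append (xs ys : List Int) (k : Nat) :
    pvM (xs ++ ys) k = pvM xs (ys.count 1 + k) ++ pvM ys k := by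
  induction xs with
  | nil => simp [pvM]
  | cons v rest ih =>
    simp only [List.cons_append, pvM, ih, List.count_append]
    congr 2
    omega

theorem pvFlip_pvF (v : Int) (k : Nat) : pvFlip (pvF v k) = pvF v (k + 1) := by
  unfold pvFlip pvF
  rcases Nat.eq_zero_or_pos k with h | h
  · subst h
    by_cases hv : v = 1 <;> simp [hv]
  · have h1 : ¬ (k = 0) := by omega
    by_cases he : k % 2 = 0
    · have h3 : (k + 1) % 2 = 1 := by omega
      simp [h1, he, h3]
    · have ho : k % 2 = 1 := by omega
      have h3 : (k + 1) % 2 = 0 := by omega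
      simp [h1, ho, h3]

theorem map_pvFlip_pvM (l : List Int) (k : Nat) : (pvM l k).map pvFlip = pvM l (k + 1) := by
  induction l generalizing k with
  | nil => rfl
  | cons v rest ih =>
    simp only [pvM, List.map_cons, ih, pvFlip_pvF]
    rw [Nat.add_assoc]

-- setting at the junction of an append
theorem set_append_len (xs : List Int) (y v : Int) (zs : List Int) :
    (xs ++ y :: zs).set xs.length v = xs ++ v :: zs := by
  induction xs with
  | nil => rfl
  | cons x xs ih => simp [List.set, ih]

-- ---- A side ----

-- A's outer-loop body
def pvStepA (cur : List Int) (pos : Nat) : List Int :=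
  if PySem.List.pyGetD cur (pos : Int) 0 = 1 then
    (PySem.List.enumerate (PySem.List.slice (PySem.List.pySetD cur (pos : Int) 0) none (some (pos : Int)))).foldl
      (fun c pc =>
        if pc.2 = 1 then PySem.List.pySetD c pc.1 0
        else PySem.List.pySetD c pc.1 1)
      (PySem.List.pySetD cur (pos : Int) 0)
  else cur

theorem switchLights_eq_foldl (a : List Int) :
    switchLights a = (List.range a.length).foldl pvStepA a := by
  unfold switchLights pvStepA
  rfl

-- the inner loop flips the enumerated snapshot in place
theorem inner_fold (s : List Int) : ∀ (done rest : List Int), done.length = off →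
    (PySem.List.enumerate s (off : Int)).foldl
      (fun c pc =>
        if pc.2 = 1 then PySem.List.pySetD c pc.1 0
        else PySem.List.pySetD c pc.1 1) (done ++ s ++ rest)
    = done ++ s.map pvFlip ++ rest := by
  induction s generalizing off with
  | nil => intro done rest h; simp [PySem.List.enumerate_nil]
  | cons v s' ih =>
    intro done rest h
    rw [PySem.List.enumerate_cons]
    simp only [List.foldl_cons]
    have hset : (if v = 1 then PySem.List.pySetD (done ++ (v :: s') ++ rest) ((off : Int)) 0
        else PySem.List.pySetD (done ++ (v :: s') ++ rest) ((off : Int)) 1)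
        = done ++ (pvFlip v :: s') ++ rest := by
      by_cases hv : v = 1 <;>
        simp [hv, pvFlip, PySem.List.pySetD_natCast, ← h,
          List.append_assoc, set_append_len]
    rw [hset]
    have hcast : ((off : Int) + 1) = ((off + 1 : Nat) : Int) := by push_cast; ring
    rw [hcast]
    have := ih (off := off + 1) (done ++ [pvFlip v]) rest (by simp [h])
    simpa [List.append_assoc] using this

theorem pvStepA_inv (a : List Int) (p : Nat) (hp : p < a.length) :
    pvStepA (pvM (a.take p) 0 ++ a.drop p) p = pvM (a.take (p + 1)) 0 ++ a.drop (p + 1) := by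
  have hlen : (pvM (a.take p) 0).length = p := by
    rw [pvM_length]; simp [Nat.min_eq_left (le_of_lt hp)]
  have hdrop : a.drop p = a[p] :: a.drop (p + 1) := List.drop_eq_getElem_cons hp
  have htake : a.take (p + 1) = a.take p ++ [a[p]] := by
    rw [List.take_succ]
    simp [List.getElem?_eq_getElem hp]
  have hcandle : PySem.List.pyGetD (pvM (a.take p) 0 ++ a.drop p) (p : Int) 0 = a[p] := by
    rw [PySem.List.pyGetD_natCast, hdrop]
    rw [List.getD_eq_getElem?_getD, List.getElem?_append_right (by omega)]
    simp [hlen, List.getElem?_eq_getElem hp]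
  unfold pvStepA
  rw [hcandle]
  by_cases hv : a[p] = 1
  · rw [if_pos hv]
    have hset : PySem.List.pySetD (pvM (a.take p) 0 ++ a.drop p) (p : Int) 0
        = pvM (a.take p) 0 ++ (0 : Int) :: a.drop (p + 1) := by
      have h2 := set_append_len (pvM (a.take p) 0) a[p] 0 (a.drop (p + 1))
      rw [hlen] at h2
      rw [PySem.List.pySetD_natCast, hdrop]
      exact h2
    rw [hset]
    have hslice : PySem.List.slice (pvM (a.take p) 0 ++ (0 : Int) :: a.drop (p + 1)) none (some (p : Int))
        = pvM (a.take p) 0 := by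
      rw [PySem.List.slice_to_natCast]
      exact List.take_left' hlen
    rw [hslice]
    have hin := inner_fold (off := 0) (pvM (a.take p) 0) [] ((0 : Int) :: a.drop (p + 1)) rfl
    simp only [List.nil_append, Nat.cast_zero] at hin
    rw [hin, map_pvFlip_pvM, htake, hv, pvM_append]
    simp [pvM, pvF]
  · rw [if_neg hv, htake, pvM_append, hdrop]
    have hc : List.count 1 [a[p]] = 0 := by simp [List.count_cons]; omega
    simp [hc, pvM, pvF, hv]

theorem A_inv (a : List Int) : ∀ p, p ≤ a.length →
    (List.range p).foldl pvStepA a = pvM (a.take p) 0 ++ a.drop p := by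
  intro p
  induction p with
  | zero => intro _; simp [pvM]
  | succ q ih =>
    intro h
    rw [List.range_succ, List.foldl_append, ih (by omega)]
    simp only [List.foldl_cons, List.foldl_nil]
    exact pvStepA_inv a q (by omega)

theorem switchLights_eq_pvM (a : List Int) : switchLights a = pvM a 0 := by
  rw [switchLights_eq_foldl, A_inv a a.length (le_refl _)]
  simp

-- ---- B side ----

-- the values produced by B's loop from running counter k over (reversed) input l
def pvRun : List Int → Nat → List Int
  | [], _ => []
  | v :: rest, k =>
    (if k = 0 then (if v = 1 then 0 else v) else ((k % 2 : Nat) : Int)) ::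
      pvRun rest (if v = 1 then k + 1 else k)

theorem pvRun_head (v : Int) (k : Nat) :
    (if k = 0 then (if v = 1 then 0 else v) else ((k % 2 : Nat) : Int)) = pvF v k := rfl

theorem foldl_B (l : List Int) : ∀ (out : List Int) (k : Nat),
    l.foldl (fun (st : List Int × Nat) v =>
      (st.1 ++ [if st.2 = 0 then (if v = 1 then 0 else v) else ((st.2 % 2 : Nat) : Int)],
       if v = 1 then st.2 + 1 else st.2)) (out, k)
    = (out ++ pvRun l k, k + l.count 1) := by
  induction l with
  | nil => intro out k; simp [pvRun]
  | cons v rest ih =>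
    intro out k
    simp only [List.foldl_cons, ih, pvRun, List.count_cons, Prod.mk.injEq]
    refine ⟨by simp, ?_⟩
    by_cases hv : v = 1 <;> simp [hv] <;> omega

theorem pvRun_append (xs ys : List Int) (k : Nat) :
    pvRun (xs ++ ys) k = pvRun xs k ++ pvRun ys (k + xs.count 1) := by
  induction xs generalizing k with
  | nil => simp [pvRun]
  | cons v rest ih =>
    have harg : (if v = 1 then k + 1 else k) + rest.count 1 = k + (v :: rest).count 1 := by
      by_cases hv : v = 1 <;> simp [List.count_cons, hv] <;> omega
    simp only [List.cons_append, pvRun, ih, harg]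

theorem pvRun_reverse (l : List Int) (k : Nat) :
    (pvRun l.reverse k).reverse = pvM l k := by
  induction l generalizing k with
  | nil => rfl
  | cons v rest ih =>
    rw [List.reverse_cons, pvRun_append]
    simp only [List.reverse_append, pvRun, pvRun_head, List.count_reverse]
    simp [pvM, ih, pvF, Nat.add_comm]

theorem switchLights_alt_eq_pvM (a : List Int) : switchLights_alt a = pvM a 0 := by
  unfold switchLights_alt
  rw [foldl_B]
  simpa using pvRun_reverse a 0

-- ===== VERDICT (by name: the statement is the Claim_ definition above) =====
theorem switchLights_spec : Claim_equal_switchLights := by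
  intro a _
  unfold Spec_switchLights
  rw [switchLights_eq_pvM, switchLights_alt_eq_pvM]
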